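-- pv_equiv track=rewrite | github.com/phobo3s/Algoritms | Coursera/Brute_Force_2.py | PermCount
-- ===== SOURCE A (Python) =====
-- def PermCount(values,leng):
--     leng -= 1
--     a = len(values) -leng
--     if leng != 0:
--         pc = a * PermCount(values, leng)
--     else:
--         pc = len(values)
--     return pc
-- ===== SOURCE B (Python) =====
-- def PermCount(values, leng):
--     pc = 1
--     for i in range(leng):
--         pc *= len(values) - i
--     return pc
-- ===== Notes on version B (the rewrite author's own statement) =====
-- stated objective: simpler
-- what changed: Replaces the linear recursion with a single iterative product loop over range(leng) accumulating the falling factorial.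
import Mathlib
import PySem

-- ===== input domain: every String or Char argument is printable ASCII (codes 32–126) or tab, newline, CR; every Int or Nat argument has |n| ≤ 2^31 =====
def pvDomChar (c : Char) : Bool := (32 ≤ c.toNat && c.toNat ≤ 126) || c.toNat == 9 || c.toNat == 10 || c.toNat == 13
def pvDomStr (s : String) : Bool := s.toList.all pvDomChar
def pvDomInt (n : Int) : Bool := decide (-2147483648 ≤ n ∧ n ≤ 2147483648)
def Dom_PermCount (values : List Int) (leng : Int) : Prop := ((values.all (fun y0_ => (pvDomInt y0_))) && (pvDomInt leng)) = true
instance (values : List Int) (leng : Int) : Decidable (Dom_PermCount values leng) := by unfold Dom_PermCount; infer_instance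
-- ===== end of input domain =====

-- B replaces A's linear recursion by a simple iterative product loop (same cost, constant stack);
-- equivalence is about the return value only.

-- ===== PORT A =====
-- Literal port of A's recursion; the Nat fuel (= leng.toNat) only guarantees totality:
-- for leng ≥ 1 (i.e. inside Pre_) the fuel is exactly the recursion depth Python takes,
-- so the `0` branch is never reached there (Python raises RecursionError for leng ≤ 0).
def PermCountGo (values : List Int) (leng : Int) : Nat → Int
  | 0 => 0
  | fuel + 1 =>
    let l := leng - 1
    let a := (values.length : Int) - l
    if l ≠ 0 then a * PermCountGo values l fuel else (values.length : Int)

def PermCount (values : List Int) (leng : Int) : Int :=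
  PermCountGo values leng leng.toNat

-- ===== PORT B =====
def PermCount_alt (values : List Int) (leng : Int) : Int :=
  (PySem.List.pyRange 0 leng 1).foldl (fun pc i => pc * ((values.length : Int) - i)) 1

-- ===== PRECONDITION & SPEC =====
-- Pre_ excludes leng ≤ 0, on which Python A recurses without bound and raises RecursionError.
def Pre_PermCount (values : List Int) (leng : Int) : Prop := 1 ≤ leng
instance (values : List Int) (leng : Int) : Decidable (Pre_PermCount values leng) := by
  unfold Pre_PermCount; infer_instance

def pvWitness_PermCount : List Int × Int := ([3, 1, 4, 1], 3)

def Spec_PermCount (values : List Int) (leng : Int) (out : Int) : Prop := out = PermCount_alt values leng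
instance (values : List Int) (leng : Int) (out : Int) : Decidable (Spec_PermCount values leng out) := by
  unfold Spec_PermCount; infer_instance

-- ===== CLAIM (what is proved, stated in full; the proofs are below) =====
def Claim_equal_PermCount : Prop := ∀ (values : List Int) (leng : Int), Dom_PermCount values leng → Pre_PermCount values leng → Spec_PermCount values leng (PermCount values leng)

-- ===== LEMMAS AND PROOFS =====

-- both sides compute the falling factorial ∏_{i<n+1} (len - i); A right-to-left, B left-to-right
theorem permCountGo_eq_fold (values : List Int) : ∀ n : Nat,
    PermCountGo values ((n : Int) + 1) (n + 1)
      = (PySem.List.pyRange 0 ((n : Int) + 1) 1).foldl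
          (fun pc i => pc * ((values.length : Int) - i)) 1 := by
  intro n
  induction n with
  | zero =>
    have h0 : PySem.List.pyRange 0 (0 + 1) 1 = [(0 : Int)] :=
      PySem.List.pyRange_one_singleton 0
    simp only [Nat.cast_zero, zero_add] at *
    rw [h0]
    simp [PermCountGo]
  | succ m ih =>
    have hl : ((m : Int) + 1 + 1) - 1 = (m : Int) + 1 := by ring
    have hne : ((m : Int) + 1) ≠ 0 := by positivity
    have hsplit : PySem.List.pyRange 0 ((m : Int) + 1 + 1) 1
        = PySem.List.pyRange 0 ((m : Int) + 1) 1 ++ [(m : Int) + 1] := by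
      exact PySem.List.pyRange_one_succ_right (by positivity)
    have hunf : ∀ (l : Int) (f : Nat), PermCountGo values l (f + 1)
        = if l - 1 ≠ 0 then ((values.length : Int) - (l - 1)) * PermCountGo values (l - 1) f
          else (values.length : Int) := fun l f => rfl
    push_cast
    rw [hsplit, List.foldl_append, hunf ((m : Int) + 1 + 1) (m + 1), hl, if_pos hne, ih]
    simp only [List.foldl]
    ring

-- ===== VERDICT =====
theorem PermCount_spec : Claim_equal_PermCount := by
  intro values leng _ hpre
  unfold Spec_PermCount PermCount PermCount_alt
  have hpos : 0 < leng := hpre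
  obtain ⟨m, hm⟩ : ∃ m : Nat, leng = (m : Int) + 1 := by
    refine ⟨(leng - 1).toNat, ?_⟩
    omega
  subst hm
  have htn : ((m : Int) + 1).toNat = m + 1 := by omega
  rw [htn]
  exact permCountGo_eq_fold values m
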